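-- pv_equiv track=rewrite | github.com/zentrum-lexikographie/dwdsmor | tools/paradigm.py | sort_form
-- ===== SOURCE A (Python) =====
-- TAG_NONST = "ugs."
--
-- TAG_OLD = "va."
--
-- TAG_OLDORTH = "ung."
--
-- TAG_CH = "CH"
--
-- def format_tags(tags):
--     return "(" + ", ".join(tags) + ")"
--
-- def sort_form(form):
--     key = -1
--     for index, tags in enumerate([format_tags([TAG_NONST]),
--                                   format_tags([TAG_OLD]),
--                                   format_tags([TAG_OLDORTH]),
--                                   format_tags([TAG_NONST, TAG_OLDORTH]),
--                                   format_tags([TAG_OLD, TAG_OLDORTH]),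
--                                   format_tags([TAG_CH]),
--                                   format_tags([TAG_NONST, TAG_CH]),
--                                   format_tags([TAG_OLD, TAG_CH])]):
--         if form.endswith(tags):
--             key = index
--     return (key, form)
-- ===== SOURCE B (Python) =====
-- def sort_form(form):
--     # Parse the trailing parenthetical into its comma-separated components and
--     # compute the sort key arithmetically (group base + modifier offset).
--     i = form.rfind("(")
--     if i < 0 or not form.endswith(")"):
--         return (-1, form)
--     content = form[i + 1:-1]
--     j = content.find(", ")
--     if j < 0:
--         key = {"ugs.": 0, "va.": 1, "ung.": 2, "CH": 5}.get(content, -1)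
--     else:
--         first, last = content[:j], content[j + 2:]
--         if first in ("ugs.", "va.") and last in ("ung.", "CH"):
--             key = (2 if last == "ung." else 5) + 1 + (0 if first == "ugs." else 1)
--         else:
--             key = -1
--     return (key, form)
-- ===== Notes on version B (the rewrite author's own statement) =====
-- stated objective: alternative
-- what changed: Instead of testing the string against all 8 enumerated tag suffixes, B locates the trailing parenthetical via rfind/endswith, splits its content at the first comma-space separator into modifier and group components, and computes the key arithmetically as group base plus modifier offset.
import Mathlib
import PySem

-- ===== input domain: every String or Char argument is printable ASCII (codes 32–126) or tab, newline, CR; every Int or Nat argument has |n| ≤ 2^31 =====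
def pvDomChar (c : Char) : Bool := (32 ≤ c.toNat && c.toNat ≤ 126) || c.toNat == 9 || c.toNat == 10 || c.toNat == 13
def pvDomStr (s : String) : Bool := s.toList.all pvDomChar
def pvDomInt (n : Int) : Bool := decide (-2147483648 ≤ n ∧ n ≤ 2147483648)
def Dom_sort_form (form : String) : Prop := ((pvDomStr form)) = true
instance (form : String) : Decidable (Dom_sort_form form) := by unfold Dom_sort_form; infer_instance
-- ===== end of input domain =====

-- B parses the trailing parenthetical into its comma-separated components and computes the
-- key arithmetically (group base + modifier offset) instead of matching the whole suffix
-- against the enumerated list of 8 tag strings; objective: alternative.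

-- ===== PORT A =====
def format_tags (tags : List String) : String :=
  "(" ++ PySem.Str.join ", " tags ++ ")"

def sort_form (form : String) : Int × String :=
  let key : Int :=
    (PySem.List.enumerate [format_tags ["ugs."],
                           format_tags ["va."],
                           format_tags ["ung."],
                           format_tags ["ugs.", "ung."],
                           format_tags ["va.", "ung."],
                           format_tags ["CH"],
                           format_tags ["ugs.", "CH"],
                           format_tags ["va.", "CH"]]).foldl
      (fun key it => if PySem.Str.endswith form it.2 then it.1 else key) (-1)
  (key, form)

-- ===== PORT B =====
def sort_form_alt (form : String) : Int × String :=
  let i := PySem.Str.rfind form "("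
  if i < 0 ∨ PySem.Str.endswith form ")" = false then (-1, form)
  else
    let content := PySem.Str.slice form (some (i + 1)) (some (-1))
    let j := PySem.Str.find content ", "
    let key : Int :=
      if j < 0 then
        PySem.Dict.getD (PySem.Dict.mk [("ugs.", 0), ("va.", 1), ("ung.", 2), ("CH", 5)]) content (-1)
      else
        let first := PySem.Str.slice content none (some j)
        let lastPart := PySem.Str.slice content (some (j + 2)) none
        if (first = "ugs." ∨ first = "va.") ∧ (lastPart = "ung." ∨ lastPart = "CH") then
          (if lastPart = "ung." then 2 else 5) + 1 + (if first = "ugs." then 0 else 1)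
        else -1
    (key, form)

-- ===== PRECONDITION & SPEC =====
def Spec_sort_form (form : String) (out : Int × String) : Prop := out = sort_form_alt form
instance (form : String) (out : Int × String) : Decidable (Spec_sort_form form out) := by unfold Spec_sort_form; infer_instance

-- ===== CLAIM (what is proved, stated in full; the proofs are below) =====
def Claim_equal_sort_form : Prop := ∀ (form : String), Dom_sort_form form → Spec_sort_form form (sort_form form)

-- ===== LEMMAS AND PROOFS =====

-- rfind.go returns the highest j ≤ n at which sub is a prefix of s.drop j, else -1
lemma go_spec (s sub : List Char) (n : ℕ) :
    (PySem.Chars.rfind.go s sub n = -1 ∧ ∀ j ≤ n, ¬ sub <+: s.drop j) ∨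
    (∃ k ≤ n, PySem.Chars.rfind.go s sub n = (k : Int) ∧ sub <+: s.drop k ∧
      ∀ j, k < j → j ≤ n → ¬ sub <+: s.drop j) := by
  induction n with
  | zero =>
    by_cases h : sub.isPrefixOf s
    · right
      exact ⟨0, le_refl 0, by simp [PySem.Chars.rfind.go, h],
        by simpa using (List.isPrefixOf_iff_prefix.mp h), by omega⟩
    · left
      constructor
      · simp [PySem.Chars.rfind.go, h]
      · intro j hj
        interval_cases j
        simpa [List.isPrefixOf_iff_prefix] using h
  | succ n ih =>
    by_cases h : sub.isPrefixOf (s.drop (n + 1))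
    · right
      exact ⟨n + 1, le_refl _, by simp [PySem.Chars.rfind.go, h],
        List.isPrefixOf_iff_prefix.mp h, by omega⟩
    · have hno : ¬ sub <+: s.drop (n + 1) := by
        simpa [List.isPrefixOf_iff_prefix] using h
      rcases ih with ⟨he, hall⟩ | ⟨k, hk, he, hp, hmax⟩
      · left
        refine ⟨by simp [PySem.Chars.rfind.go, h, he], ?_⟩
        intro j hj
        rcases Nat.lt_or_ge j (n + 1) with hlt | hge
        · exact hall j (by omega)
        · have : j = n + 1 := by omega
          subst this; exact hno
      · right
        refine ⟨k, by omega, by simp [PySem.Chars.rfind.go, h, he], hp, ?_⟩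
        intro j hkj hj
        rcases Nat.lt_or_ge j (n + 1) with hlt | hge
        · exact hmax j hkj (by omega)
        · have : j = n + 1 := by omega
          subst this; exact hno

-- specialisation to searching for '(' with the bound removed
lemma rfind_par (s : List Char) :
    (PySem.Chars.rfind s ['('] = -1 ∧ ∀ j, ¬ ['('] <+: s.drop j) ∨
    (∃ k : ℕ, PySem.Chars.rfind s ['('] = (k : Int) ∧ ['('] <+: s.drop k ∧
      ∀ j : ℕ, k < j → ¬ ['('] <+: s.drop j) := by
  have hnil : ∀ j, s.length < j → ¬ ['('] <+: s.drop j := by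
    intro j hj hpre
    rw [List.drop_eq_nil_of_le (by omega)] at hpre
    simp at hpre
  rcases go_spec s ['('] s.length with ⟨he, hall⟩ | ⟨k, hk, he, hp, hmax⟩
  · left
    refine ⟨he, fun j => ?_⟩
    rcases Nat.lt_or_ge s.length j with h | h
    · exact hnil j h
    · exact hall j h
  · right
    refine ⟨k, he, hp, fun j hkj => ?_⟩
    rcases Nat.lt_or_ge s.length j with h | h
    · exact hnil j h
    · exact hmax j hkj h

-- when there is no '(' in form, no tag (which starts with '(') is a suffix
lemma str_endswith_neg (form t : String) (u : List Char) (ht : t.toList = '(' :: u)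
    (hr : PySem.Chars.rfind form.toList ['('] = -1) :
    PySem.Str.endswith form t = false := by
  rcases rfind_par form.toList with ⟨_, hno⟩ | ⟨k, he, _⟩
  · rw [Bool.eq_false_iff]
    intro htrue
    have hsuf : t.toList <:+ form.toList := by
      simpa using (PySem.Chars.endswith_iff _ _).mp (by simpa using htrue)
    obtain ⟨pre, hpre⟩ := hsuf
    apply hno pre.length
    rw [← hpre, List.drop_left, ht]
    exact ⟨u, rfl⟩
  · rw [he] at hr; omega

-- when the last '(' of form is at index k, a tag is a suffix iff it equals form[k:]
lemma str_endswith_pos (form t : String) (u : List Char) (ht : t.toList = '(' :: u)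
    (hu : '(' ∉ u) (k : ℕ) (hr : PySem.Chars.rfind form.toList ['('] = (k : ℕ)) :
    PySem.Str.endswith form t = decide (form.toList.drop k = t.toList) := by
  rcases rfind_par form.toList with ⟨he, _⟩ | ⟨k', he, hP, hmax⟩
  · rw [he] at hr; omega
  · have hkk : k' = k := by rw [he] at hr; exact_mod_cast hr
    subst hkk
    by_cases hd : form.toList.drop k' = t.toList
    · have htr : PySem.Chars.endswith form.toList t.toList = true :=
        (PySem.Chars.endswith_iff _ _).mpr (hd ▸ List.drop_suffix k' form.toList)
      simp [PySem.Str.endswith_eq, htr, hd]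
    · rw [decide_eq_false hd, PySem.Str.endswith_eq, Bool.eq_false_iff]
      intro htrue
      have hsuf : t.toList <:+ form.toList := by
        simpa using (PySem.Chars.endswith_iff _ _).mp (by simpa using htrue)
      obtain ⟨pre, hpre⟩ := hsuf
      have hPpre : ['('] <+: form.toList.drop pre.length := by
        rw [← hpre, List.drop_left, ht]; exact ⟨u, rfl⟩
      have h1 : pre.length ≤ k' := by
        by_contra hlt
        exact hmax pre.length (by omega) hPpre
      rcases Nat.lt_or_ge pre.length k' with h2 | h2
      · have hdrop : form.toList.drop k' = u.drop (k' - pre.length - 1) := by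
          rw [← hpre, ht, List.drop_append, List.drop_eq_nil_of_le (by omega),
            List.nil_append]
          obtain ⟨m, hm⟩ : ∃ m, k' - pre.length = m + 1 := ⟨k' - pre.length - 1, by omega⟩
          rw [hm, List.drop_succ_cons]
          simp
        rw [hdrop] at hP
        obtain ⟨rest, hrest⟩ := hP
        have hmem : '(' ∈ u.drop (k' - pre.length - 1) := by
          rw [← hrest]; simp
        exact hu (List.mem_of_mem_drop hmem)
      · have hplen : pre.length = k' := by omega
        apply hd
        rw [← hpre, ← hplen, List.drop_left, ht]

-- [ch] is a suffix of l iff l's last element is ch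
lemma singleton_suffix_iff (l : List Char) (ch : Char) : [ch] <:+ l ↔ l.getLast? = some ch := by
  constructor
  · rintro ⟨init, rfl⟩; simp
  · intro h
    rcases List.eq_nil_or_concat l with rfl | ⟨l', a, rfl⟩
    · simp at h
    · simp at h
      exact ⟨l', by simp [h]⟩

-- xs[a:-1] for a natural a within bounds
lemma slice_nat_negone (xs : List Char) (a : ℕ) (h : a ≤ xs.length) :
    PySem.List.slice xs (some (a : Int)) (some (-1)) = (xs.drop a).dropLast := by
  unfold PySem.List.slice
  simp only [PySem.List.clampIdx_neg_one, PySem.List.clampIdx_natCast, List.dropLast_eq_take,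
    List.length_drop, Nat.min_eq_left h]
  congr 1
  omega

-- String equality against ofList, reduced to char lists
lemma ofList_eq_str (d : List Char) (t : String) : (String.ofList d = t) ↔ d = t.toList := by
  constructor
  · intro h; rw [← h]; simp
  · intro h; rw [h]; simp

-- String BEq against ofList, as a decide over char lists
lemma beq_ofList (t : String) (d : List Char) :
    (t == String.ofList d) = decide (d = t.toList) := by
  rcases eq_or_ne d t.toList with h | h
  · subst h; simp
  · have h2 : t ≠ String.ofList d := by
      intro hc; apply h; rw [hc]; simp
    simp [h, h2]

lemma wrap_inj (c l : List Char) : ('(' :: (c ++ [')']) = '(' :: (l ++ [')'])) ↔ c = l := by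
  simp

lemma str_eq_of_toList {s t : String} (h : s.toList = t.toList) : s = t := by
  have := congrArg String.ofList h
  simpa using this

lemma sort_form_eq (form : String) : sort_form form = sort_form_alt form := by
  rcases rfind_par form.toList with ⟨hr, _⟩ | ⟨k, hr, hP, hmax⟩
  · -- no '(' in form: both sides give -1
    have e0 := str_endswith_neg form "(ugs.)" ['u','g','s','.',')'] (by decide) hr
    have e1 := str_endswith_neg form "(va.)" ['v','a','.',')'] (by decide) hr
    have e2 := str_endswith_neg form "(ung.)" ['u','n','g','.',')'] (by decide) hr
    have e3 := str_endswith_neg form "(ugs., ung.)" ['u','g','s','.',',',' ','u','n','g','.',')'] (by decide) hr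
    have e4 := str_endswith_neg form "(va., ung.)" ['v','a','.',',',' ','u','n','g','.',')'] (by decide) hr
    have e5 := str_endswith_neg form "(CH)" ['C','H',')'] (by decide) hr
    have e6 := str_endswith_neg form "(ugs., CH)" ['u','g','s','.',',',' ','C','H',')'] (by decide) hr
    have e7 := str_endswith_neg form "(va., CH)" ['v','a','.',',',' ','C','H',')'] (by decide) hr
    unfold sort_form sort_form_alt
    simp only [show format_tags ["ugs."] = "(ugs.)" from by decide,
      show format_tags ["va."] = "(va.)" from by decide,
      show format_tags ["ung."] = "(ung.)" from by decide,
      show format_tags ["ugs.", "ung."] = "(ugs., ung.)" from by decide,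
      show format_tags ["va.", "ung."] = "(va., ung.)" from by decide,
      show format_tags ["CH"] = "(CH)" from by decide,
      show format_tags ["ugs.", "CH"] = "(ugs., CH)" from by decide,
      show format_tags ["va.", "CH"] = "(va., CH)" from by decide] at *
    simp at e0 e1 e2 e3 e4 e5 e6 e7
    simp [PySem.List.enumerate, List.foldl, e0, e1, e2, e3, e4, e5, e6, e7, hr]
  · -- last '(' at index k
    have hfr : PySem.Str.rfind form "(" = (k : Int) := by
      rw [PySem.Str.rfind_eq]; exact hr
    have e0 := str_endswith_pos form "(ugs.)" ['u','g','s','.',')'] (by decide) (by decide) k hr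
    have e1 := str_endswith_pos form "(va.)" ['v','a','.',')'] (by decide) (by decide) k hr
    have e2 := str_endswith_pos form "(ung.)" ['u','n','g','.',')'] (by decide) (by decide) k hr
    have e3 := str_endswith_pos form "(ugs., ung.)" ['u','g','s','.',',',' ','u','n','g','.',')'] (by decide) (by decide) k hr
    have e4 := str_endswith_pos form "(va., ung.)" ['v','a','.',',',' ','u','n','g','.',')'] (by decide) (by decide) k hr
    have e5 := str_endswith_pos form "(CH)" ['C','H',')'] (by decide) (by decide) k hr
    have e6 := str_endswith_pos form "(ugs., CH)" ['u','g','s','.',',',' ','C','H',')'] (by decide) (by decide) k hr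
    have e7 := str_endswith_pos form "(va., CH)" ['v','a','.',',',' ','C','H',')'] (by decide) (by decide) k hr
    obtain ⟨rest, hd⟩ := hP
    have hdk : form.toList.drop k = '(' :: rest := by rw [← hd]; rfl
    have hklen : k < form.toList.length := by
      by_contra h
      rw [List.drop_eq_nil_of_le (by omega)] at hdk
      simp at hdk
    have hend_iff : PySem.Str.endswith form ")" = true ↔ [')'] <:+ form.toList.drop k := by
      rw [PySem.Str.endswith_eq, show (")" : String).toList = [')'] from by decide,
        PySem.Chars.endswith_iff]
      constructor
      · intro h
        have h1 : form.toList.getLast? = some ')' := (singleton_suffix_iff _ _).mp h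
        have h2 : (form.toList.drop k).getLast? = form.toList.getLast? := by
          conv_rhs => rw [← List.take_append_drop k form.toList]
          rw [List.getLast?_append_of_ne_nil _ (show form.toList.drop k ≠ [] from by rw [hdk]; simp)]
        exact (singleton_suffix_iff _ _).mpr (h2.trans h1)
      · intro h
        exact h.trans (List.drop_suffix k form.toList)
    by_cases hE : [')'] <:+ form.toList.drop k
    · -- the tail from the last '(' is '(' :: c ++ [')']
      obtain ⟨ini, hini⟩ := hE
      rw [hdk] at hini
      rcases ini with _ | ⟨x, c⟩
      · simp at hini
      · rw [List.cons_append] at hini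
        obtain ⟨hx, hrest⟩ : x = '(' ∧ c ++ [')'] = rest := by simpa using hini
        subst hx
        subst hrest
        have hdk' : form.toList.drop k = '(' :: (c ++ [')']) := hdk
        have hEtrue : PySem.Str.endswith form ")" = true :=
          hend_iff.mpr ⟨'(' :: c, by rw [hdk']; simp⟩
        have hlen2 : k + 1 ≤ form.toList.length := by omega
        have hcontS : PySem.Str.slice form (some ((k : Int) + 1)) (some (-1)) = String.ofList c := by
          apply str_eq_of_toList
          rw [PySem.Str.toList_slice, PySem.Chars.slice_eq_listSlice,
            show ((k : Int) + 1) = (((k + 1 : ℕ) : Int)) from by push_cast; ring,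
            slice_nat_negone _ _ hlen2]
          have hdrop1 : form.toList.drop (k + 1) = c ++ [')'] := by
            have h2 : form.toList.drop (k + 1) = (form.toList.drop k).drop 1 := by
              rw [List.drop_drop]
            rw [h2, hdk']
            simp
          rw [hdrop1]
          simp
        -- the eight suffix tests become equality tests on the content c
        rw [hdk'] at e0 e1 e2 e3 e4 e5 e6 e7
        have f0 : PySem.Str.endswith form "(ugs.)" = decide (c = "ugs.".toList) := by
          rw [e0,
            show ("(ugs.)" : String).toList = '(' :: ("ugs.".toList ++ [')']) from by decide]
          exact decide_eq_decide.mpr (wrap_inj _ _)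
        have f1 : PySem.Str.endswith form "(va.)" = decide (c = "va.".toList) := by
          rw [e1,
            show ("(va.)" : String).toList = '(' :: ("va.".toList ++ [')']) from by decide]
          exact decide_eq_decide.mpr (wrap_inj _ _)
        have f2 : PySem.Str.endswith form "(ung.)" = decide (c = "ung.".toList) := by
          rw [e2,
            show ("(ung.)" : String).toList = '(' :: ("ung.".toList ++ [')']) from by decide]
          exact decide_eq_decide.mpr (wrap_inj _ _)
        have f3 : PySem.Str.endswith form "(ugs., ung.)" = decide (c = "ugs., ung.".toList) := by
          rw [e3,
            show ("(ugs., ung.)" : String).toList = '(' :: ("ugs., ung.".toList ++ [')']) from by decide]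
          exact decide_eq_decide.mpr (wrap_inj _ _)
        have f4 : PySem.Str.endswith form "(va., ung.)" = decide (c = "va., ung.".toList) := by
          rw [e4,
            show ("(va., ung.)" : String).toList = '(' :: ("va., ung.".toList ++ [')']) from by decide]
          exact decide_eq_decide.mpr (wrap_inj _ _)
        have f5 : PySem.Str.endswith form "(CH)" = decide (c = "CH".toList) := by
          rw [e5,
            show ("(CH)" : String).toList = '(' :: ("CH".toList ++ [')']) from by decide]
          exact decide_eq_decide.mpr (wrap_inj _ _)
        have f6 : PySem.Str.endswith form "(ugs., CH)" = decide (c = "ugs., CH".toList) := by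
          rw [e6,
            show ("(ugs., CH)" : String).toList = '(' :: ("ugs., CH".toList ++ [')']) from by decide]
          exact decide_eq_decide.mpr (wrap_inj _ _)
        have f7 : PySem.Str.endswith form "(va., CH)" = decide (c = "va., CH".toList) := by
          rw [e7,
            show ("(va., CH)" : String).toList = '(' :: ("va., CH".toList ++ [')']) from by decide]
          exact decide_eq_decide.mpr (wrap_inj _ _)
        have hfindS : PySem.Str.find (String.ofList c) ", " = PySem.Chars.find c [',', ' '] := by
          rw [PySem.Str.find_eq]
          simp
        unfold sort_form sort_form_alt
        simp only [show format_tags ["ugs."] = "(ugs.)" from by decide,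
          show format_tags ["va."] = "(va.)" from by decide,
          show format_tags ["ung."] = "(ung.)" from by decide,
          show format_tags ["ugs.", "ung."] = "(ugs., ung.)" from by decide,
          show format_tags ["va.", "ung."] = "(va., ung.)" from by decide,
          show format_tags ["CH"] = "(CH)" from by decide,
          show format_tags ["ugs.", "CH"] = "(ugs., CH)" from by decide,
          show format_tags ["va.", "CH"] = "(va., CH)" from by decide,
          PySem.List.enumerate, List.foldl, hfr, hcontS, hfindS,
          f0, f1, f2, f3, f4, f5, f6, f7, decide_eq_true_eq]
        rw [if_neg (show ¬((k : Int) < 0 ∨ PySem.Str.endswith form ")" = false) from by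
          rw [not_or]
          have hEtrue' : PySem.Chars.endswith form.toList [')'] = true := by
            have h := hEtrue
            rw [PySem.Str.endswith_eq] at h
            simpa using h
          exact ⟨by omega, by simp [hEtrue']⟩)]
        simp only [Prod.mk.injEq, and_true]
        by_cases hneg : PySem.Chars.find c [',', ' '] < 0
        · -- no ", " in the content: only single-tag contents can match
          rw [if_pos hneg]
          have hm1 : PySem.Chars.find c [',', ' '] = -1 := by
            have h := PySem.Chars.findFrom_natCast_eq_neg_one_iff c [',', ' '] 0 (by omega)
            simp only [Nat.cast_zero, PySem.Chars.findFrom_zero] at h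
            rcases lt_trichotomy (PySem.Chars.find c [',', ' ']) (-1) with h' | h' | h'
            · exfalso
              have := PySem.Chars.findFrom_natCast_spec c [',', ' '] 0 (by omega)
              simp only [Nat.cast_zero, PySem.Chars.findFrom_zero] at this
              have := (this (by omega)).1
              omega
            · exact h'
            · omega
          have hNo : ¬ [',', ' '] <:+: c := by
            have h := PySem.Chars.findFrom_natCast_eq_neg_one_iff c [',', ' '] 0 (by omega)
            simp only [Nat.cast_zero, PySem.Chars.findFrom_zero] at h
            simpa using h.mp hm1
          have g3 : ¬ (c = ['u','g','s','.',',',' ','u','n','g','.']) := fun h => hNo (h ▸ by decide)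
          have g4 : ¬ (c = ['v','a','.',',',' ','u','n','g','.']) := fun h => hNo (h ▸ by decide)
          have g6 : ¬ (c = ['u','g','s','.',',',' ','C','H']) := fun h => hNo (h ▸ by decide)
          have g7 : ¬ (c = ['v','a','.',',',' ','C','H']) := fun h => hNo (h ▸ by decide)
          by_cases h0 : c = ['u','g','s','.']
          · rw [h0]; decide
          by_cases h1 : c = ['v','a','.']
          · rw [h1]; decide
          by_cases h2 : c = ['u','n','g','.']
          · rw [h2]; decide
          by_cases h5 : c = ['C','H']
          · rw [h5]; decide
          · simp [h0, h1, h2, h5, g3, g4, g6, g7, PySem.Dict.getD, beq_ofList, PySem.Dict.get?]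
        · -- the content contains ", " at its first index jn
          rw [if_neg hneg]
          have hne : PySem.Chars.find c [',', ' '] ≠ -1 := by omega
          have hspec := PySem.Chars.findFrom_natCast_spec c [',', ' '] 0 (by omega)
          simp only [Nat.cast_zero, PySem.Chars.findFrom_zero] at hspec
          obtain ⟨-, hpre, -⟩ := hspec (by exact_mod_cast hne)
          set jn := (PySem.Chars.find c [',', ' ']).toNat with hjn
          have hj : PySem.Chars.find c [',', ' '] = (jn : Int) := by omega
          obtain ⟨t, ht⟩ := hpre
          have hdrop2 : c.drop (jn + 2) = t := by
            have h2 : c.drop (jn + 2) = (c.drop jn).drop 2 := by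
              rw [List.drop_drop]
            rw [h2, ← ht]
            simp
          have hcsplit : c = c.take jn ++ ([',', ' '] ++ c.drop (jn + 2)) := by
            conv_lhs => rw [← List.take_append_drop jn c]
            rw [hdrop2, ht]
          have s0 : ¬ (c = ['u','g','s','.']) := fun h => hneg (by rw [h]; decide)
          have s1 : ¬ (c = ['v','a','.']) := fun h => hneg (by rw [h]; decide)
          have s2 : ¬ (c = ['u','n','g','.']) := fun h => hneg (by rw [h]; decide)
          have s5 : ¬ (c = ['C','H']) := fun h => hneg (by rw [h]; decide)
          by_cases h3 : c = ['u','g','s','.',',',' ','u','n','g','.']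
          · rw [h3]; decide
          by_cases h4 : c = ['v','a','.',',',' ','u','n','g','.']
          · rw [h4]; decide
          by_cases h6 : c = ['u','g','s','.',',',' ','C','H']
          · rw [h6]; decide
          by_cases h7 : c = ['v','a','.',',',' ','C','H']
          · rw [h7]; decide
          · -- no tag matches: both keys are -1
            rw [hj]
            have hfirst : PySem.Str.slice (String.ofList c) none (some ((jn : ℕ) : Int))
                = String.ofList (c.take jn) := by
              apply str_eq_of_toList
              rw [PySem.Str.toList_slice, PySem.Chars.slice_eq_listSlice,
                PySem.List.slice_to _ (by exact_mod_cast Nat.zero_le jn)]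
              simp
            have hlast : PySem.Str.slice (String.ofList c) (some ((jn : Int) + 2)) none
                = String.ofList (c.drop (jn + 2)) := by
              apply str_eq_of_toList
              rw [PySem.Str.toList_slice, PySem.Chars.slice_eq_listSlice,
                show ((jn : Int) + 2) = (((jn + 2 : ℕ) : Int)) from by push_cast; ring,
                PySem.List.slice_from _ (by exact_mod_cast Nat.zero_le (jn + 2))]
              simp
              omega
            rw [hfirst, hlast]
            rw [if_neg (show ¬ ((String.ofList (c.take jn) = "ugs." ∨ String.ofList (c.take jn) = "va.") ∧
                (String.ofList (c.drop (jn + 2)) = "ung." ∨ String.ofList (c.drop (jn + 2)) = "CH")) from by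
              rintro ⟨hF | hF, hL | hL⟩
              · exact h3 (by rw [hcsplit, (ofList_eq_str _ _).mp hF, (ofList_eq_str _ _).mp hL]; decide)
              · exact h6 (by rw [hcsplit, (ofList_eq_str _ _).mp hF, (ofList_eq_str _ _).mp hL]; decide)
              · exact h4 (by rw [hcsplit, (ofList_eq_str _ _).mp hF, (ofList_eq_str _ _).mp hL]; decide)
              · exact h7 (by rw [hcsplit, (ofList_eq_str _ _).mp hF, (ofList_eq_str _ _).mp hL]; decide))]
            simp [s0, s1, s2, s5, h3, h4, h6, h7]
    · -- form does not end with ')': no tag can match, B takes the guard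
      have hEfalse : PySem.Str.endswith form ")" = false := by
        rw [Bool.eq_false_iff]
        intro h
        exact hE (hend_iff.mp h)
      have n0 : ¬ (form.toList.drop k = ['(','u','g','s','.',')']) := fun h => hE (h ▸ by decide)
      have n1 : ¬ (form.toList.drop k = ['(','v','a','.',')']) := fun h => hE (h ▸ by decide)
      have n2 : ¬ (form.toList.drop k = ['(','u','n','g','.',')']) := fun h => hE (h ▸ by decide)
      have n3 : ¬ (form.toList.drop k = ['(','u','g','s','.',',',' ','u','n','g','.',')']) := fun h => hE (h ▸ by decide)
      have n4 : ¬ (form.toList.drop k = ['(','v','a','.',',',' ','u','n','g','.',')']) := fun h => hE (h ▸ by decide)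
      have n5 : ¬ (form.toList.drop k = ['(','C','H',')']) := fun h => hE (h ▸ by decide)
      have n6 : ¬ (form.toList.drop k = ['(','u','g','s','.',',',' ','C','H',')']) := fun h => hE (h ▸ by decide)
      have n7 : ¬ (form.toList.drop k = ['(','v','a','.',',',' ','C','H',')']) := fun h => hE (h ▸ by decide)
      unfold sort_form sort_form_alt
      simp only [show format_tags ["ugs."] = "(ugs.)" from by decide,
        show format_tags ["va."] = "(va.)" from by decide,
        show format_tags ["ung."] = "(ung.)" from by decide,
        show format_tags ["ugs.", "ung."] = "(ugs., ung.)" from by decide,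
        show format_tags ["va.", "ung."] = "(va., ung.)" from by decide,
        show format_tags ["CH"] = "(CH)" from by decide,
        show format_tags ["ugs.", "CH"] = "(ugs., CH)" from by decide,
        show format_tags ["va.", "CH"] = "(va., CH)" from by decide,
        PySem.List.enumerate, List.foldl, hfr, hEfalse,
        e0, e1, e2, e3, e4, e5, e6, e7]
      simp [n0, n1, n2, n3, n4, n5, n6, n7]

-- ===== VERDICT (by name: the statement is the Claim_ definition above) =====
theorem sort_form_spec : Claim_equal_sort_form := by
  intro form _
  unfold Spec_sort_form
  exact sort_form_eq form
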